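-- pv_equiv track=rewrite | github.com/DTennant/Prometheus | src/prometheus/code_evolution/mutator.py | _validate_and_apply
-- ===== SOURCE A (Python) =====
-- from typing import TYPE_CHECKING, Any
--
-- def _validate_and_apply(
--     ops: list[dict[str, Any]],
--     files: dict[str, str],
-- ) -> dict[str, str]:
--     """Validate operations and apply to a copy of files."""
--     result = dict(files)
--     valid_ops = {"modify", "create", "delete"}
--     for op in ops:
--         op_type = op.get("op")
--         path = op.get("path", "")
--         if op_type not in valid_ops:
--             raise ValueError(f"Invalid op: {op_type}")
--         if not path or path.startswith("..") or path.startswith("/"):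
--             raise ValueError(f"Invalid path: {path!r}")
--         if op_type in ("modify", "create"):
--             if "content" not in op:
--                 raise ValueError(f"Missing content for {op_type} on {path}")
--             result[path] = op["content"]
--         elif op_type == "delete":
--             result.pop(path, None)
--     return result
-- ===== SOURCE B (Python) =====
-- def _validate_and_apply(ops, files):
--     """Two-pass re-implementation: validate every op first, then apply.
--
--     Valid because the original discards its partial result whenever it raises,
--     so validating everything up front yields the same returns and the same
--     first exception (same type and message)."""
--     valid_ops = {"modify", "create", "delete"}
--     for op in ops:
--         op_type = op.get("op")
--         path = op.get("path", "")
--         if op_type not in valid_ops: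
--             raise ValueError(f"Invalid op: {op_type}")
--         if not path or path.startswith("..") or path.startswith("/"):
--             raise ValueError(f"Invalid path: {path!r}")
--         if op_type != "delete" and "content" not in op:
--             raise ValueError(f"Missing content for {op_type} on {path}")
--     result = dict(files)
--     for op in ops:
--         if op["op"] == "delete":
--             result.pop(op["path"], None)
--         else:
--             result[op["path"]] = op["content"]
--     return result
-- ===== Notes on version B (the rewrite author's own statement) =====
-- stated objective: alternative
-- what changed: Splits A's single fused loop into two passes: a pure validation pass over ops (raising the same ValueErrors in the same order) followed by a pure application fold onto dict(files); sound because A discards its partial result on any exception.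
import Mathlib
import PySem

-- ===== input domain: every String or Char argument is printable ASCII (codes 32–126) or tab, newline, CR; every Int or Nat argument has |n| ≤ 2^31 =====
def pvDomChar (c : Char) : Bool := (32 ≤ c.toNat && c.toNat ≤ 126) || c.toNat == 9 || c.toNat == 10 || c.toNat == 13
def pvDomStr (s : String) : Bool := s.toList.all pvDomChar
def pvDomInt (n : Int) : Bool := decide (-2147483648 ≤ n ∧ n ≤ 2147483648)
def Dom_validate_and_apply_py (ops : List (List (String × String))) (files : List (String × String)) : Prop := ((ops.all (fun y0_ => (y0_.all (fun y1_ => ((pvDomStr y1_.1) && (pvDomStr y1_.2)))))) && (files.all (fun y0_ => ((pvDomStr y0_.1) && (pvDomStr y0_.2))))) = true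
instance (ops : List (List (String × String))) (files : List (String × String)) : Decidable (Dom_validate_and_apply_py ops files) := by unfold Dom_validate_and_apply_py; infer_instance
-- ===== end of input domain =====

-- B splits A's fused validate-and-apply loop into a validation pass followed by an application pass (same results; A raises are excluded by Pre_).


-- ===== PORT A =====
-- A's fused loop: validate each op and apply it immediately; `none` models a raise.
def goA_validate_and_apply (ops : List (List (String × String)))
    (result : PySem.Dict String String) : Option (PySem.Dict String String) :=
  match ops with
  | [] => some result
  | op :: rest =>
    let d := PySem.Dict.ofList op
    let op_type := d.get? "op"
    let path := d.getD "path" ""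
    if !(op_type == some "modify" || op_type == some "create" || op_type == some "delete") then
      none
    else if path == "" || PySem.Str.startswith path ".." || PySem.Str.startswith path "/" then
      none
    else if op_type == some "modify" || op_type == some "create" then
      match d.get? "content" with
      | none => none
      | some c => goA_validate_and_apply rest (result.insert path c)
    else
      goA_validate_and_apply rest (result.erase path)

def validate_and_apply_py (ops : List (List (String × String))) (files : List (String × String)) : List (String × String) :=
  ((goA_validate_and_apply ops (PySem.Dict.ofList files)).getD PySem.Dict.empty).items

-- ===== PORT B =====
-- pass 1: pure validation of one op
def opOK_validate_and_apply (op : List (String × String)) : Bool :=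
  let d := PySem.Dict.ofList op
  let op_type := d.get? "op"
  let path := d.getD "path" ""
  (op_type == some "modify" || op_type == some "create" || op_type == some "delete")
  && !(path == "" || PySem.Str.startswith path ".." || PySem.Str.startswith path "/")
  && (op_type == some "delete" || d.contains "content")

-- pass 2: pure application of one already-validated op ("path"/"content" lookups are total
-- renderings of op["path"]/op["content"], exact once validation has passed)
def applyOp_validate_and_apply (acc : PySem.Dict String String)
    (op : List (String × String)) : PySem.Dict String String :=
  let d := PySem.Dict.ofList op
  if d.get? "op" == some "delete" then acc.erase (d.getD "path" "")
  else acc.insert (d.getD "path" "") (d.getD "content" "")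

def validate_and_apply_py_alt (ops : List (List (String × String))) (files : List (String × String)) : List (String × String) :=
  if ops.all opOK_validate_and_apply then
    (ops.foldl applyOp_validate_and_apply (PySem.Dict.ofList files)).items
  else []

-- ===== PRECONDITION & SPEC =====
-- Pre_ excludes exactly the inputs on which A raises ValueError: an op whose "op" value is not
-- modify/create/delete, whose path is empty or starts with ".." or "/", or a modify/create op
-- without a "content" key.
def Pre_validate_and_apply_py (ops : List (List (String × String))) (files : List (String × String)) : Prop :=
  ∀ op ∈ ops,
    ((PySem.Dict.ofList op).get? "op" = some "modify" ∨
     (PySem.Dict.ofList op).get? "op" = some "create" ∨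
     (PySem.Dict.ofList op).get? "op" = some "delete") ∧
    ¬ ((PySem.Dict.ofList op).getD "path" "" = "" ∨
       PySem.Str.startswith ((PySem.Dict.ofList op).getD "path" "") ".." = true ∨
       PySem.Str.startswith ((PySem.Dict.ofList op).getD "path" "") "/" = true) ∧
    ((PySem.Dict.ofList op).get? "op" = some "delete" ∨
     (PySem.Dict.ofList op).contains "content" = true)
instance (ops : List (List (String × String))) (files : List (String × String)) : Decidable (Pre_validate_and_apply_py ops files) := by unfold Pre_validate_and_apply_py; infer_instance

def pvWitness_validate_and_apply_py : (List (List (String × String))) × (List (String × String)) :=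
  ([[("op", "create"), ("path", "a.txt"), ("content", "hi")], [("op", "delete"), ("path", "b")]],
   [("b", "x"), ("c", "y")])

def Spec_validate_and_apply_py (ops : List (List (String × String))) (files : List (String × String)) (out : List (String × String)) : Prop := out = validate_and_apply_py_alt ops files
instance (ops : List (List (String × String))) (files : List (String × String)) (out : List (String × String)) : Decidable (Spec_validate_and_apply_py ops files out) := by unfold Spec_validate_and_apply_py; infer_instance

-- ===== CLAIM (what is proved, stated in full; the proofs are below) =====
def Claim_equal_validate_and_apply_py : Prop := ∀ (ops : List (List (String × String))) (files : List (String × String)), Dom_validate_and_apply_py ops files → Pre_validate_and_apply_py ops files → Spec_validate_and_apply_py ops files (validate_and_apply_py ops files)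

-- ===== LEMMAS AND PROOFS =====

-- On validated op lists, A's fused loop returns exactly B's application fold.
theorem goA_eq_foldl (ops : List (List (String × String)))
    (h : ∀ op ∈ ops,
      ((PySem.Dict.ofList op).get? "op" = some "modify" ∨
       (PySem.Dict.ofList op).get? "op" = some "create" ∨
       (PySem.Dict.ofList op).get? "op" = some "delete") ∧
      ¬ ((PySem.Dict.ofList op).getD "path" "" = "" ∨
         PySem.Str.startswith ((PySem.Dict.ofList op).getD "path" "") ".." = true ∨
         PySem.Str.startswith ((PySem.Dict.ofList op).getD "path" "") "/" = true) ∧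
      ((PySem.Dict.ofList op).get? "op" = some "delete" ∨
       (PySem.Dict.ofList op).contains "content" = true))
    (r : PySem.Dict String String) :
    goA_validate_and_apply ops r = some (ops.foldl applyOp_validate_and_apply r) := by
  induction ops generalizing r with
  | nil => rfl
  | cons op rest ih =>
    obtain ⟨hty, hpath, hcontent⟩ := h op (by simp)
    have hrest := fun o ho => h o (List.mem_cons_of_mem _ ho)
    simp only [goA_validate_and_apply, List.foldl_cons]
    rw [if_neg (by rcases hty with h1 | h1 | h1 <;> simp [h1]),
        if_neg (by simp only [Bool.or_eq_true, beq_iff_eq]; exact fun h' => hpath (by tauto))]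
    rcases hty with hm | hm | hd
    case inl | inr.inl =>
      rw [if_pos (by simp [hm])]
      have hcon : (PySem.Dict.ofList op).contains "content" = true := by
        rcases hcontent with hdel | hcon
        · rw [hm] at hdel; simp at hdel
        · exact hcon
      rcases Option.isSome_iff_exists.mp
          ((PySem.Dict.contains_eq_isSome_get? (PySem.Dict.ofList op) "content").symm.trans hcon)
        with ⟨c, hc'⟩
      rw [hc']
      have happ : applyOp_validate_and_apply r op =
          r.insert ((PySem.Dict.ofList op).getD "path" "") c := by
        simp only [applyOp_validate_and_apply]
        rw [if_neg (by simp [hm]), PySem.Dict.getD_of_get?_eq_some _ _ hc']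
      rw [happ]; exact ih hrest _
    case inr.inr =>
      rw [if_neg (by simp [hd])]
      have happ : applyOp_validate_and_apply r op =
          r.erase ((PySem.Dict.ofList op).getD "path" "") := by
        simp only [applyOp_validate_and_apply]
        rw [if_pos (by simp [hd])]
      rw [happ]; exact ih hrest _

theorem all_opOK (ops : List (List (String × String)))
    (h : Pre_validate_and_apply_py ops []) :
    ops.all opOK_validate_and_apply = true := by
  rw [List.all_eq_true]
  intro op hop
  obtain ⟨hty, hpath, hcontent⟩ := h op hop
  have hA : ¬ ((PySem.Dict.ofList op).getD "path" "" = "") := fun h' => hpath (Or.inl h')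
  have hB : PySem.Str.startswith ((PySem.Dict.ofList op).getD "path" "") ".." = false :=
    Bool.eq_false_iff.mpr (fun h' => hpath (Or.inr (Or.inl h')))
  have hC : PySem.Str.startswith ((PySem.Dict.ofList op).getD "path" "") "/" = false :=
    Bool.eq_false_iff.mpr (fun h' => hpath (Or.inr (Or.inr h')))
  rcases hty with h1 | h1 | h1 <;> rcases hcontent with h2 | h2 <;>
    simp_all [opOK_validate_and_apply]

-- ===== VERDICT (by name: the statement is the Claim_ definition above) =====
theorem validate_and_apply_py_spec : Claim_equal_validate_and_apply_py := by
  intro ops files _ hpre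
  unfold Spec_validate_and_apply_py validate_and_apply_py validate_and_apply_py_alt
  rw [goA_eq_foldl ops hpre, all_opOK ops (fun op hop => hpre op hop)]
  simp
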